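-- pv_equiv track=rewrite | github.com/Juhyun22/Coding_Test | programmers/공던지기.py | solution
-- ===== SOURCE A (Python) =====
-- from collections import deque
--
-- def solution(numbers, k):
--   answer = 0
--   a = deque(numbers)
--   c = 1
--   while c != k:
--     a.rotate(-2)
--     c += 1
--   return list(a)[0]
-- ===== SOURCE B (Python) =====
-- def solution(numbers, k):
--     return numbers[(2 * (k - 1)) % len(numbers)]
-- ===== Notes on version B (the rewrite author's own statement) =====
-- stated objective: faster
-- what changed: Replaced the k-1 deque rotations with a single modular index lookup numbers[(2*(k-1)) % len(numbers)].
import Mathlib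
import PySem

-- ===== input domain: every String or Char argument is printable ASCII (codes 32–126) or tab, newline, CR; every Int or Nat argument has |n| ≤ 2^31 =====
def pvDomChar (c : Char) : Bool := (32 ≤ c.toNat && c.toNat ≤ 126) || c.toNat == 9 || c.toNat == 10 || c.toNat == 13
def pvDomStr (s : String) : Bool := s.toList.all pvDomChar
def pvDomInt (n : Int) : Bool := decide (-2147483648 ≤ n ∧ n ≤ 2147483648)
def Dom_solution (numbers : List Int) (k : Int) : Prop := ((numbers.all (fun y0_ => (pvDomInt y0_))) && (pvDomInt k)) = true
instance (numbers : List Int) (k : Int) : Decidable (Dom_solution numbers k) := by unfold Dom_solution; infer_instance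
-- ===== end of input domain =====

-- B replaces A's k-1 explicit deque rotations with one O(1) modular index lookup.


-- ===== PORT A =====
-- deque's a.rotate(-2) = two single left rotations (exact also for length 0 and 1)
def pvRot1 : List Int → List Int
  | [] => []
  | x :: xs => xs ++ [x]

-- the while loop: c runs from 1 to k, so k-1 iterations of rotate(-2)
def pvRotLoop : List Int → Nat → List Int
  | l, 0 => l
  | l, m + 1 => pvRotLoop (pvRot1 (pvRot1 l)) m

def solution (numbers : List Int) (k : Int) : Int :=
  (PySem.List.pyGet? (pvRotLoop numbers (k - 1).toNat) 0).getD 0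

-- ===== PORT B =====
def solution_alt (numbers : List Int) (k : Int) : Int :=
  (PySem.List.pyGet? numbers (PySem.Int.mod (2 * (k - 1)) numbers.length)).getD 0

-- ===== PRECONDITION & SPEC =====
-- A raises IndexError on numbers = [] and its while loop never terminates for k < 1
def Pre_solution (numbers : List Int) (k : Int) : Prop := numbers ≠ [] ∧ 1 ≤ k
instance (numbers : List Int) (k : Int) : Decidable (Pre_solution numbers k) := by unfold Pre_solution; infer_instance
def pvWitness_solution : List Int × Int := ([3, 1, 4, 1, 5], 4)

def Spec_solution (numbers : List Int) (k : Int) (out : Int) : Prop := out = solution_alt numbers k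
instance (numbers : List Int) (k : Int) (out : Int) : Decidable (Spec_solution numbers k out) := by unfold Spec_solution; infer_instance

-- ===== CLAIM (what is proved, stated in full; the proofs are below) =====
def Claim_equal_solution : Prop := ∀ (numbers : List Int) (k : Int), Dom_solution numbers k → Pre_solution numbers k → Spec_solution numbers k (solution numbers k)

-- ===== LEMMAS AND PROOFS =====
theorem pvRot1_eq_rotate (l : List Int) : pvRot1 l = l.rotate 1 := by
  cases l with
  | nil => rfl
  | cons x xs => simp [pvRot1, List.rotate_cons_succ]

theorem pvRotLoop_eq_rotate (m : Nat) (l : List Int) : pvRotLoop l m = l.rotate (2 * m) := by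
  induction m generalizing l with
  | zero => simp [pvRotLoop]
  | succ n ih =>
      simp only [pvRotLoop, ih, pvRot1_eq_rotate, List.rotate_rotate]
      congr 1
      omega

-- ===== VERDICT (by name: the statement is the Claim_ definition above) =====
theorem solution_spec : Claim_equal_solution := by
  intro numbers k _ hpre
  obtain ⟨hne, hk⟩ := hpre
  have hlen : 0 < numbers.length := List.length_pos_iff.mpr hne
  unfold Spec_solution solution solution_alt
  rw [pvRotLoop_eq_rotate]
  set m : Nat := (k - 1).toNat with hm
  have hk1 : (2 * (k - 1)) = ((2 * m : Nat) : Int) := by push_cast; omega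
  rw [hk1, PySem.Int.mod_natCast]
  have h0 : (0 : Int) = ((0 : Nat) : Int) := rfl
  rw [h0, PySem.List.pyGet?_natCast, PySem.List.pyGet?_natCast]
  have hlt : 2 * m % numbers.length < numbers.length := Nat.mod_lt _ hlen
  have hlt0 : 0 < (numbers.rotate (2 * m)).length := by
    rw [List.length_rotate]; exact hlen
  rw [List.getElem?_eq_getElem hlt0, List.getElem?_eq_getElem hlt,
      List.getElem_rotate]
  simp
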